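-- pv_equiv track=rewrite | github.com/6210qwe/leetcode_py | leetcode_solutions/by_id/q2098.py | find_pairs_with_max_common_followers
-- ===== SOURCE A (Python) =====
-- from typing import List, Optional
--
-- def find_pairs_with_max_common_followers(followers: List[List[int]]) -> List[List[int]]:
--     """
--     函数式接口 - 找到具有最多共同关注者的所有两两结对组
--     """
--     # 创建一个字典，键为用户ID，值为该用户的关注者集合
--     user_followers = {i: set(followers[i]) for i in range(len(followers))}
--
--     max_common_followers = 0
--     result = []
--
--     # 遍历所有可能的用户对
--     for i in range(len(followers)):
--         for j in range(i + 1, len(followers)):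
--             common_followers = user_followers[i] & user_followers[j]
--             num_common_followers = len(common_followers)
--
--             if num_common_followers > max_common_followers:
--                 max_common_followers = num_common_followers
--                 result = [[i, j]]
--             elif num_common_followers == max_common_followers:
--                 result.append([i, j])
--
--     return result
-- ===== SOURCE B (Python) =====
-- from typing import List, Optional
--
-- def find_pairs_with_max_common_followers(followers: List[List[int]]) -> List[List[int]]:
--     n = len(followers)
--     # inverted index: follower -> list of users that follow them (each user once)
--     index = {}
--     for i, fl in enumerate(followers):
--         for f in dict.fromkeys(fl):
--             if f in index:
--                 index[f].append(i)
--             else: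
--                 index[f] = [i]
--     # one pair occurrence per shared follower
--     pairs = []
--     for users in index.values():
--         for a in users:
--             for b in users:
--                 if a < b:
--                     pairs.append((a, b))
--     counts = {}
--     for p in pairs:
--         counts[p] = counts.get(p, 0) + 1
--     m = 0
--     for v in counts.values():
--         if v > m:
--             m = v
--     return [[i, j] for i in range(n) for j in range(i + 1, n) if counts.get((i, j), 0) == m]
-- ===== Notes on version B (the rewrite author's own statement) =====
-- stated objective: alternative
-- what changed: Replaces the all-pairs set-intersection scan by an inverted index follower->users: each shared follower contributes one count to each user pair it induces, then the maximum of these counts is taken and pairs matching it are collected in lex order.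
import Mathlib
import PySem

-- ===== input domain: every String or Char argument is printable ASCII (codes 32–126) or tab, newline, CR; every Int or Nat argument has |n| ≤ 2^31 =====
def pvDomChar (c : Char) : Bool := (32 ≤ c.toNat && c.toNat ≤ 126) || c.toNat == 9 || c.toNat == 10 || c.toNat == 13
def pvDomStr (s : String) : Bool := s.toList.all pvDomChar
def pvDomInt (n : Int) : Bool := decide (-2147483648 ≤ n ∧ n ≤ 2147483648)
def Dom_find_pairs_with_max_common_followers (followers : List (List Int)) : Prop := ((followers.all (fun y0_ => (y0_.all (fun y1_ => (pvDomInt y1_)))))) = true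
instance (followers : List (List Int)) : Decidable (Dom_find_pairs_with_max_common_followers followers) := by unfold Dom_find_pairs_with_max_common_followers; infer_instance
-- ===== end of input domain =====

-- B replaces the all-pairs set-intersection scan by an inverted index follower -> users
-- (each shared follower contributes one count to the pair it induces); alternative algorithm,
-- same return value.

-- ===== PORT A =====
def find_pairs_with_max_common_followers (followers : List (List Int)) : List (List Int) :=
  let n : Int := (followers.length : Int)
  -- user_followers = {i: set(followers[i]) for i in range(len(followers))}
  let user_followers : PySem.Dict Int (PySem.Set Int) :=
    (PySem.List.pyRange 0 n 1).foldl
      (fun d i => d.insert i (PySem.Set.ofList (PySem.List.pyGetD followers i []))) PySem.Dict.empty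
  let st :=
    (PySem.List.pyRange 0 n 1).foldl (fun st i =>
      (PySem.List.pyRange (i + 1) n 1).foldl (fun st j =>
        let common := PySem.Set.inter (user_followers.getD i PySem.Set.empty)
                                      (user_followers.getD j PySem.Set.empty)
        let num : Int := PySem.Set.len common
        if num > st.1 then (num, [[i, j]])
        else if num = st.1 then (st.1, st.2 ++ [[i, j]])
        else st) st)
      ((0 : Int), ([] : List (List Int)))
  st.2

-- ===== PORT B =====
-- inverted index: follower -> list of users that follow them (each user once, in order)
def pvIndex (followers : List (List Int)) : PySem.Dict Int (List Int) :=
  (PySem.List.enumerate followers 0).foldl (fun d p =>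
    (PySem.List.dedup p.2).foldl (fun d f =>
      if d.contains f then d.insert f (d.getD f [] ++ [p.1]) else d.insert f [p.1]) d)
    PySem.Dict.empty

-- one pair occurrence per shared follower
def pvPairs (followers : List (List Int)) : List (Int × Int) :=
  (pvIndex followers).values.foldl (fun acc users =>
    users.foldl (fun acc a =>
      users.foldl (fun acc b => if a < b then acc ++ [(a, b)] else acc) acc) acc) []

def pvCounts (followers : List (List Int)) : PySem.Dict (Int × Int) Int :=
  (pvPairs followers).foldl (fun d p => d.insert p (d.getD p 0 + 1)) PySem.Dict.empty

def find_pairs_with_max_common_followers_alt (followers : List (List Int)) : List (List Int) :=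
  let n : Int := (followers.length : Int)
  let counts := pvCounts followers
  let m : Int := counts.values.foldl (fun m v => if v > m then v else m) 0
  (PySem.List.pyRange 0 n 1).foldl (fun acc i =>
    (PySem.List.pyRange (i + 1) n 1).foldl (fun acc j =>
      if counts.getD (i, j) 0 = m then acc ++ [[i, j]] else acc) acc) []

-- ===== PRECONDITION & SPEC =====
def Spec_find_pairs_with_max_common_followers (followers : List (List Int)) (out : List (List Int)) : Prop := out = find_pairs_with_max_common_followers_alt followers
instance (followers : List (List Int)) (out : List (List Int)) : Decidable (Spec_find_pairs_with_max_common_followers followers out) := by unfold Spec_find_pairs_with_max_common_followers; infer_instance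

-- ===== CLAIM (what is proved, stated in full; the proofs are below) =====
def Claim_equal_find_pairs_with_max_common_followers : Prop := ∀ (followers : List (List Int)), Dom_find_pairs_with_max_common_followers followers → Spec_find_pairs_with_max_common_followers followers (find_pairs_with_max_common_followers followers)

-- ===== LEMMAS AND PROOFS =====

-- proof-side abbreviations
def pvS (followers : List (List Int)) (i : Int) : PySem.Set Int :=
  PySem.Set.ofList (PySem.List.pyGetD followers i [])

def pvPairList (n : Int) : List (Int × Int) :=
  (PySem.List.pyRange 0 n 1).flatMap (fun i => (PySem.List.pyRange (i + 1) n 1).map (fun j => (i, j)))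

def pvCA (followers : List (List Int)) (p : Int × Int) : Int :=
  PySem.Set.len (PySem.Set.inter (pvS followers p.1) (pvS followers p.2))

def pvStep (c : Int × Int → Int) (st : Int × List (List Int)) (p : Int × Int) : Int × List (List Int) :=
  if c p > st.1 then (c p, [[p.1, p.2]])
  else if c p = st.1 then (st.1, st.2 ++ [[p.1, p.2]])
  else st

def pvMax (c : Int × Int → Int) (P : List (Int × Int)) : Int :=
  P.foldl (fun m p => max m (c p)) 0

def pvM (followers : List (List Int)) : Int :=
  (pvCounts followers).values.foldl (fun m v => if v > m then v else m) 0

def pvInnerStep (i : Int) (d : PySem.Dict Int (List Int)) (f : Int) : PySem.Dict Int (List Int) :=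
  d.insert f (d.getD f [] ++ [i])

-- the two branches of B's index update are one insert
lemma pv_branch (d : PySem.Dict Int (List Int)) (i f : Int) :
    (if d.contains f then d.insert f (d.getD f [] ++ [i]) else d.insert f [i]) = pvInnerStep i d f := by
  unfold pvInnerStep
  by_cases h : d.contains f = true
  · simp [h]
  · have h' : d.contains f = false := by simpa using h
    simp [h', PySem.Dict.getD_of_not_contains d [] h']

lemma pvIndex_eq (followers : List (List Int)) :
    pvIndex followers = (PySem.List.enumerate followers 0).foldl
      (fun d p => (PySem.List.dedup p.2).foldl (pvInnerStep p.1) d) PySem.Dict.empty := by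
  unfold pvIndex
  simp only [pv_branch]

lemma pv_inner_getD (fl : List Int) (hnd : fl.Nodup) :
    ∀ (d : PySem.Dict Int (List Int)) (i f' : Int),
      (fl.foldl (pvInnerStep i) d).getD f' [] =
        d.getD f' [] ++ (if f' ∈ fl then [i] else []) := by
  induction fl with
  | nil => intro d i f'; simp
  | cons x rest ih =>
    intro d i f'
    have hx : x ∉ rest := (List.nodup_cons.mp hnd).1
    rw [List.foldl_cons, ih (List.nodup_cons.mp hnd).2]
    unfold pvInnerStep
    rw [PySem.Dict.getD_insert]
    by_cases h : f' = x
    · subst h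
      simp [hx]
    · simp [h, List.mem_cons]

lemma pv_outer_getD (xs : List (List Int)) :
    ∀ (s : Int) (d : PySem.Dict Int (List Int)) (f : Int),
      ((PySem.List.enumerate xs s).foldl
          (fun d p => (PySem.List.dedup p.2).foldl (pvInnerStep p.1) d) d).getD f [] =
        d.getD f [] ++
          (((PySem.List.enumerate xs s).filter (fun p => decide (f ∈ p.2))).map (fun p => p.1)) := by
  induction xs with
  | nil => intro s d f; simp [PySem.List.enumerate]
  | cons x rest ih =>
    intro s d f
    rw [PySem.List.enumerate_cons, List.foldl_cons, ih]
    rw [pv_inner_getD _ (PySem.List.nodup_dedup x) d s f]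
    by_cases h : f ∈ x
    · simp [List.filter_cons, h, PySem.List.mem_dedup, List.append_assoc]
    · simp [List.filter_cons, h, PySem.List.mem_dedup]

lemma pv_index_getD (followers : List (List Int)) (f : Int) :
    (pvIndex followers).getD f [] =
      ((PySem.List.enumerate followers 0).filter (fun p => decide (f ∈ p.2))).map (fun p => p.1) := by
  rw [pvIndex_eq, pv_outer_getD]
  simp

lemma pv_mem_index_getD (followers : List (List Int)) (f u : Int) :
    u ∈ (pvIndex followers).getD f [] ↔
      ∃ (k : Nat), ∃ (h : k < followers.length), u = (k : Int) ∧ f ∈ followers[k] := by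
  rw [pv_index_getD]
  simp only [List.mem_map, List.mem_filter, PySem.List.mem_enumerate_iff, decide_eq_true_eq]
  constructor
  · rintro ⟨p, ⟨⟨k, h, rfl⟩, hf⟩, rfl⟩
    exact ⟨k, h, by simpa using hf⟩
  · rintro ⟨k, h, rfl, hf⟩
    refine ⟨((k : Int), followers[k]), ⟨?_, hf⟩, rfl⟩
    exact ⟨k, h, by simp⟩

lemma pv_mem_index_getD_iff (followers : List (List Int)) (f i : Int)
    (h0 : 0 ≤ i) (hi : i < (followers.length : Int)) :
    i ∈ (pvIndex followers).getD f [] ↔ f ∈ PySem.List.pyGetD followers i [] := by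
  rw [pv_mem_index_getD]
  rw [PySem.List.pyGetD_of_nonneg followers [] h0]
  have hlt : i.toNat < followers.length := by omega
  rw [List.getD_eq_getElem followers [] hlt]
  constructor
  · rintro ⟨k, h, hik, hf⟩
    have hk : i.toNat = k := by omega
    subst hk
    exact hf
  · intro hf
    exact ⟨i.toNat, hlt, by omega, hf⟩

lemma pv_nodup_index_getD (followers : List (List Int)) (f : Int) :
    ((pvIndex followers).getD f []).Nodup := by
  rw [pv_index_getD]
  have h1 := PySem.List.pairwise_lt_enumerate followers 0
  have h2 := h1.filter (fun p => decide (f ∈ p.2))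
  have h3 := h2.map (f := fun p : Int × List Int => p.1) (S := fun a b : Int => a < b) (fun a b hab => hab)
  exact h3.imp (fun h => ne_of_lt h)

lemma pv_index_keys_nodup_aux (xs : List (List Int)) :
    ∀ (s : Int) (d : PySem.Dict Int (List Int)), d.keys.Nodup →
      ((PySem.List.enumerate xs s).foldl
          (fun d p => (PySem.List.dedup p.2).foldl (pvInnerStep p.1) d) d).keys.Nodup := by
  induction xs with
  | nil => intro s d h; simpa [PySem.List.enumerate] using h
  | cons x rest ih =>
    intro s d h
    rw [PySem.List.enumerate_cons, List.foldl_cons]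
    exact ih _ _ (PySem.Dict.nodup_keys_foldl_insert _ _ _ h)

lemma pv_index_keys_nodup (followers : List (List Int)) : (pvIndex followers).keys.Nodup := by
  rw [pvIndex_eq]
  exact pv_index_keys_nodup_aux followers 0 _ (by simp)

lemma pv_mem_index_keys_aux (xs : List (List Int)) (f : Int) :
    ∀ (s : Int) (d : PySem.Dict Int (List Int)),
      (f ∈ ((PySem.List.enumerate xs s).foldl
          (fun d p => (PySem.List.dedup p.2).foldl (pvInnerStep p.1) d) d).keys ↔
        f ∈ d.keys ∨ ∃ fl ∈ xs, f ∈ fl) := by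
  induction xs with
  | nil => intro s d; simp [PySem.List.enumerate]
  | cons x rest ih =>
    intro s d
    rw [PySem.List.enumerate_cons, List.foldl_cons, ih]
    rw [show pvInnerStep s = (fun d f => d.insert f (d.getD f [] ++ [s])) from rfl]
    rw [PySem.Dict.keys_foldl_insert]
    rw [PySem.Set.mem_update]
    simp [PySem.List.mem_dedup, or_assoc]

lemma pv_mem_index_keys (followers : List (List Int)) (f : Int) :
    f ∈ (pvIndex followers).keys ↔ ∃ fl ∈ followers, f ∈ fl := by
  rw [pvIndex_eq, pv_mem_index_keys_aux]
  simp

lemma pvPairs_eq (followers : List (List Int)) :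
    pvPairs followers =
      (pvIndex followers).values.flatMap (fun L =>
        L.flatMap (fun a => (L.filter (fun b => decide (a < b))).map (fun b => (a, b)))) := by
  unfold pvPairs
  have hmid : ∀ (L : List Int) (acc : List (Int × Int)),
      L.foldl (fun acc a =>
        L.foldl (fun acc b => if a < b then acc ++ [(a, b)] else acc) acc) acc =
      acc ++ L.flatMap (fun a => (L.filter (fun b => decide (a < b))).map (fun b => (a, b))) := by
    intro L acc
    rw [PySem.List.foldl_congr_mem _ _
          (fun acc a => acc ++ (L.filter (fun b => decide (a < b))).map (fun b => (a, b))) _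
          (fun acc a _ => PySem.List.foldl_append_ite _ _ L acc)]
    exact PySem.List.foldl_append_eq_flatMap _ L acc
  rw [PySem.List.foldl_congr_mem _ _
        (fun acc L => acc ++ L.flatMap (fun a => (L.filter (fun b => decide (a < b))).map (fun b => (a, b)))) _
        (fun acc L _ => hmid L acc)]
  rw [PySem.List.foldl_append_eq_flatMap]
  simp

lemma pv_sum_ite_count (L : List Int) (i : Int) (c : Nat) :
    (L.map (fun a => if a = i then c else 0)).sum = L.count i * c := by
  induction L with
  | nil => simp
  | cons x rest ih =>
    rw [List.map_cons, List.sum_cons, ih]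
    by_cases h : x = i
    · subst h
      rw [if_pos rfl, List.count_cons_self, Nat.add_mul, Nat.one_mul]
      omega
    · rw [if_neg h, List.count_cons_of_ne h]
      omega

lemma pv_count_per_L (L : List Int) (hL : L.Nodup) (i j : Int) (hij : i < j) :
    (L.flatMap (fun a => (L.filter (fun b => decide (a < b))).map (fun b => (a, b)))).count (i, j) =
      if i ∈ L ∧ j ∈ L then 1 else 0 := by
  rw [List.count_flatMap]
  have hpt : ∀ a ∈ L,
      (List.count (i, j) ∘ fun a => (L.filter (fun b => decide (a < b))).map (fun b => (a, b))) a =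
        if a = i then (if j ∈ L then 1 else 0) else 0 := by
    intro a _
    simp only [Function.comp]
    by_cases ha : a = i
    · subst ha
      have hinj : Function.Injective (fun b : Int => (a, b)) := by
        intro x y hxy; exact congrArg Prod.snd hxy
      rw [if_pos rfl]
      have := List.count_map_of_injective (L.filter (fun b => decide (a < b))) _ hinj j
      rw [this]
      by_cases hj : j ∈ L
      · rw [if_pos hj]
        rw [List.count_filter (by simpa using hij)]
        exact List.count_eq_one_of_mem hL hj
      · rw [if_neg hj]
        exact List.count_eq_zero.mpr (fun hmem => hj (List.mem_of_mem_filter hmem))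
    · rw [if_neg ha]
      refine List.count_eq_zero.mpr (fun hmem => ha ?_)
      obtain ⟨b, _, hb⟩ := List.mem_map.mp hmem
      exact congrArg Prod.fst hb
  rw [List.map_congr_left hpt, pv_sum_ite_count]
  by_cases hi : i ∈ L
  · rw [List.count_eq_one_of_mem hL hi]
    by_cases hj : j ∈ L
    · simp [hi, hj]
    · simp [hi, hj]
  · rw [List.count_eq_zero.mpr hi]
    simp [hi]

lemma pv_values_eq (followers : List (List Int)) :
    (pvIndex followers).values =
      (pvIndex followers).keys.map (fun f => (pvIndex followers).getD f []) :=
  PySem.Dict.values_eq_map_keys _ (pv_index_keys_nodup followers) []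

lemma pv_sum_map_ite_one_zero_nat (p : Int → Bool) (xs : List Int) :
    (xs.map (fun x => if p x then 1 else 0)).sum = xs.countP p := by
  induction xs with
  | nil => simp
  | cons x rest ih =>
    by_cases h : p x
    · simp [h, ih, List.countP_cons, Nat.add_comm]
    · simp [h, ih, List.countP_cons]

lemma pv_count_eq_len_inter (followers : List (List Int)) (i j : Int)
    (h0 : 0 ≤ i) (hij : i < j) (hj : j < (followers.length : Int)) :
    ((pvPairs followers).count (i, j) : Int) =
      PySem.Set.len (PySem.Set.inter (pvS followers i) (pvS followers j)) := by
  unfold pvS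
  have hi : i < (followers.length : Int) := lt_trans hij hj
  have h0j : 0 ≤ j := le_trans h0 (le_of_lt hij)
  rw [pvPairs_eq, List.count_flatMap, pv_values_eq, List.map_map]
  have hpt : ∀ f ∈ (pvIndex followers).keys,
      ((List.count (i, j) ∘ fun L => L.flatMap (fun a => (L.filter (fun b => decide (a < b))).map (fun b => (a, b)))) ∘
        fun f => (pvIndex followers).getD f []) f =
      (fun f => if (f ∈ PySem.List.pyGetD followers i [] ∧ f ∈ PySem.List.pyGetD followers j []) then 1 else 0) f := by
    intro f _
    simp only [Function.comp]
    rw [pv_count_per_L _ (pv_nodup_index_getD followers f) i j hij]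
    simp only [pv_mem_index_getD_iff followers f i h0 hi, pv_mem_index_getD_iff followers f j h0j hj]
  rw [List.map_congr_left hpt]
  have : ((pvIndex followers).keys.map
      (fun f => if (f ∈ PySem.List.pyGetD followers i [] ∧ f ∈ PySem.List.pyGetD followers j []) then 1 else 0)).sum
      = (pvIndex followers).keys.countP
          (fun f => decide (f ∈ PySem.List.pyGetD followers i []) && decide (f ∈ PySem.List.pyGetD followers j [])) := by
    rw [← pv_sum_map_ite_one_zero_nat]
    congr 1
    apply List.map_congr_left
    intro f _
    by_cases h1 : f ∈ PySem.List.pyGetD followers i [] <;> by_cases h2 : f ∈ PySem.List.pyGetD followers j [] <;> simp [h1, h2]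
  rw [this, List.countP_eq_length_filter]
  -- both sides are lengths of nodup lists with the same members
  have hperm : ((pvIndex followers).keys.filter
      (fun f => decide (f ∈ PySem.List.pyGetD followers i []) && decide (f ∈ PySem.List.pyGetD followers j []))).Perm
      (PySem.Set.inter (PySem.Set.ofList (PySem.List.pyGetD followers i []))
        (PySem.Set.ofList (PySem.List.pyGetD followers j []))) := by
    rw [List.perm_ext_iff_of_nodup ((pv_index_keys_nodup followers).filter _)
        (PySem.Set.nodup_inter _ _ (PySem.Set.nodup_ofList _))]
    intro f
    rw [List.mem_filter, PySem.Set.mem_inter]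
    simp only [PySem.Set.mem_ofList, Bool.and_eq_true, decide_eq_true_eq]
    constructor
    · rintro ⟨-, h1, h2⟩; exact ⟨h1, h2⟩
    · rintro ⟨h1, h2⟩
      refine ⟨(pv_mem_index_keys followers f).mpr ⟨PySem.List.pyGetD followers i [], ?_, h1⟩, h1, h2⟩
      rw [PySem.List.pyGetD_of_nonneg followers [] h0]
      have hlt : i.toNat < followers.length := by omega
      rw [List.getD_eq_getElem followers [] hlt]
      exact List.getElem_mem hlt
  rw [hperm.length_eq]
  simp [PySem.Set.len]

lemma pv_counts_getD (followers : List (List Int)) (p : Int × Int) :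
    (pvCounts followers).getD p 0 = ((pvPairs followers).count p : Int) := by
  unfold pvCounts
  rw [PySem.Dict.getD_foldl_insert_add_one]
  simp

lemma pv_counts_keys (followers : List (List Int)) :
    (pvCounts followers).keys = PySem.Set.ofList (pvPairs followers) := by
  unfold pvCounts
  rw [PySem.Dict.keys_foldl_insert]
  simp [PySem.Set.update_nil_left]

lemma pv_counts_keys_nodup (followers : List (List Int)) : (pvCounts followers).keys.Nodup := by
  unfold pvCounts
  exact PySem.Dict.nodup_keys_foldl_insert _ _ _ (by simp)

lemma pv_mem_pairList {n : Int} {p : Int × Int} :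
    p ∈ pvPairList n ↔ 0 ≤ p.1 ∧ p.1 < p.2 ∧ p.2 < n := by
  unfold pvPairList
  rcases p with ⟨a, b⟩
  simp only [List.mem_flatMap, List.mem_map, PySem.List.mem_pyRange_one, Prod.mk.injEq]
  constructor
  · rintro ⟨i, ⟨hi0, hin⟩, j, ⟨hj1, hjn⟩, rfl, rfl⟩
    exact ⟨hi0, by omega, hjn⟩
  · rintro ⟨h0, hab, hbn⟩
    exact ⟨a, ⟨h0, by omega⟩, b, ⟨by omega, hbn⟩, rfl, rfl⟩

lemma pv_mem_pairs_pairList (followers : List (List Int)) (p : Int × Int)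
    (hp : p ∈ pvPairs followers) : p ∈ pvPairList (followers.length : Int) := by
  rw [pvPairs_eq] at hp
  obtain ⟨L, hL, hp⟩ := List.mem_flatMap.mp hp
  obtain ⟨a, ha, hp⟩ := List.mem_flatMap.mp hp
  obtain ⟨b, hb, rfl⟩ := List.mem_map.mp hp
  obtain ⟨f, -, rfl⟩ := List.mem_map.mp (pv_values_eq followers ▸ hL)
  have hab : a < b := by simpa using (List.mem_filter.mp hb).2
  have hbL : b ∈ (pvIndex followers).getD f [] := List.mem_of_mem_filter hb
  obtain ⟨ka, hka, rfl, -⟩ := (pv_mem_index_getD followers f a).mp ha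
  obtain ⟨kb, hkb, rfl, -⟩ := (pv_mem_index_getD followers f b).mp hbL
  rw [pv_mem_pairList]
  refine ⟨by omega, hab, by omega⟩

lemma pvFold_eq (c : Int × Int → Int) (P : List (Int × Int)) :
    P.foldl (pvStep c) ((0 : Int), ([] : List (List Int))) =
      (pvMax c P, (P.filter (fun p => decide (c p = pvMax c P))).map (fun p => [p.1, p.2])) := by
  induction P using List.reverseRecOn with
  | nil => simp [pvMax]
  | append_singleton P q ih =>
    have hmax : pvMax c (P ++ [q]) = max (pvMax c P) (c q) := by
      simp [pvMax]
    have hle : ∀ p ∈ P, c p ≤ pvMax c P := (PySem.List.le_foldl_max_int P c 0).2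
    rw [List.foldl_append, ih, List.foldl_cons, List.foldl_nil]
    rcases lt_trichotomy (pvMax c P) (c q) with hgt | heq | hlt
    · have hM' : pvMax c (P ++ [q]) = c q := by rw [hmax]; omega
      have hfilter : P.filter (fun p => decide (c p = c q)) = [] := by
        refine List.filter_eq_nil_iff.mpr (fun p hp => ?_)
        have := hle p hp
        simp only [decide_eq_true_eq]
        omega
      rw [hM']
      unfold pvStep
      rw [if_pos (by omega)]
      simp [List.filter_append, hfilter]
    · have hM' : pvMax c (P ++ [q]) = pvMax c P := by rw [hmax]; omega
      rw [hM']
      unfold pvStep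
      rw [if_neg (by omega), if_pos heq.symm]
      simp [List.filter_append, heq]
    · have hM' : pvMax c (P ++ [q]) = pvMax c P := by rw [hmax]; omega
      rw [hM']
      unfold pvStep
      rw [if_neg (by omega), if_neg (by omega)]
      have hq : (decide (c q = pvMax c P)) = false := decide_eq_false (by omega)
      simp [List.filter_append, List.filter_cons, hq]

lemma pv_userFollowers_getD (followers : List (List Int)) (i : Int)
    (hi : i ∈ PySem.List.pyRange 0 (followers.length : Int) 1) :
    ((PySem.List.pyRange 0 (followers.length : Int) 1).foldl
        (fun d i => d.insert i (PySem.Set.ofList (PySem.List.pyGetD followers i []))) PySem.Dict.empty).getD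
        i PySem.Set.empty = pvS followers i := by
  have hitems := PySem.Dict.items_foldl_insert_fresh
      (l := PySem.List.pyRange 0 (followers.length : Int) 1) (k := fun i => i)
      (v := fun i => PySem.Set.ofList (PySem.List.pyGetD followers i []))
      (d := PySem.Dict.empty) (fun a _ => by simp) (by simpa using PySem.List.nodup_pyRange_one 0 (followers.length : Int))
  apply PySem.Dict.getD_of_mem_items
  · rw [hitems]
    simp only [List.mem_append, List.mem_map]
    exact Or.inr ⟨i, hi, rfl⟩
  · exact PySem.Dict.nodup_keys_foldl_insert _ _ _ (by simp)

lemma pv_A_eq (followers : List (List Int)) :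
    find_pairs_with_max_common_followers followers =
      ((pvPairList (followers.length : Int)).filter
          (fun p => decide (pvCA followers p = pvMax (pvCA followers) (pvPairList (followers.length : Int))))).map
        (fun p => [p.1, p.2]) := by
  unfold find_pairs_with_max_common_followers
  have hfold :
      (PySem.List.pyRange 0 (followers.length : Int) 1).foldl (fun st i =>
        (PySem.List.pyRange (i + 1) (followers.length : Int) 1).foldl (fun st j =>
          let common := PySem.Set.inter
            (((PySem.List.pyRange 0 (followers.length : Int) 1).foldl
                (fun d i => d.insert i (PySem.Set.ofList (PySem.List.pyGetD followers i []))) PySem.Dict.empty).getD i PySem.Set.empty)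
            (((PySem.List.pyRange 0 (followers.length : Int) 1).foldl
                (fun d i => d.insert i (PySem.Set.ofList (PySem.List.pyGetD followers i []))) PySem.Dict.empty).getD j PySem.Set.empty)
          let num : Int := PySem.Set.len common
          if num > st.1 then (num, [[i, j]])
          else if num = st.1 then (st.1, st.2 ++ [[i, j]])
          else st) st)
        ((0 : Int), ([] : List (List Int))) =
      (pvPairList (followers.length : Int)).foldl (pvStep (pvCA followers)) ((0 : Int), ([] : List (List Int))) := by
    rw [pvPairList, List.foldl_flatMap]
    simp only [List.foldl_map]
    apply PySem.List.foldl_congr_mem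
    intro st i hi
    apply PySem.List.foldl_congr_mem
    intro st j hj
    have hi' : i ∈ PySem.List.pyRange 0 (followers.length : Int) 1 := hi
    have hj' : j ∈ PySem.List.pyRange 0 (followers.length : Int) 1 := by
      rw [PySem.List.mem_pyRange_one] at hi hj ⊢
      omega
    rw [pv_userFollowers_getD followers i hi', pv_userFollowers_getD followers j hj']
    rfl
  show ((PySem.List.pyRange 0 (followers.length : Int) 1).foldl (fun st i =>
        (PySem.List.pyRange (i + 1) (followers.length : Int) 1).foldl (fun st j =>
          let common := PySem.Set.inter
            (((PySem.List.pyRange 0 (followers.length : Int) 1).foldl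
                (fun d i => d.insert i (PySem.Set.ofList (PySem.List.pyGetD followers i []))) PySem.Dict.empty).getD i PySem.Set.empty)
            (((PySem.List.pyRange 0 (followers.length : Int) 1).foldl
                (fun d i => d.insert i (PySem.Set.ofList (PySem.List.pyGetD followers i []))) PySem.Dict.empty).getD j PySem.Set.empty)
          let num : Int := PySem.Set.len common
          if num > st.1 then (num, [[i, j]])
          else if num = st.1 then (st.1, st.2 ++ [[i, j]])
          else st) st)
        ((0 : Int), ([] : List (List Int)))).2 =
    ((pvPairList (followers.length : Int)).filter
        (fun p => decide (pvCA followers p = pvMax (pvCA followers) (pvPairList (followers.length : Int))))).map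
      (fun p => [p.1, p.2])
  rw [hfold, pvFold_eq]

lemma pv_B_eq (followers : List (List Int)) :
    find_pairs_with_max_common_followers_alt followers =
      ((pvPairList (followers.length : Int)).filter
          (fun p => decide ((pvCounts followers).getD p 0 = pvM followers))).map
        (fun p => [p.1, p.2]) := by
  unfold find_pairs_with_max_common_followers_alt
  show (PySem.List.pyRange 0 (followers.length : Int) 1).foldl (fun acc i =>
      (PySem.List.pyRange (i + 1) (followers.length : Int) 1).foldl (fun acc j =>
        if (pvCounts followers).getD (i, j) 0 = pvM followers then acc ++ [[i, j]] else acc) acc) [] =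
    ((pvPairList (followers.length : Int)).filter
        (fun p => decide ((pvCounts followers).getD p 0 = pvM followers))).map
      (fun p => [p.1, p.2])
  rw [PySem.List.foldl_congr_mem _ _
        (fun acc i => acc ++ ((PySem.List.pyRange (i + 1) (followers.length : Int) 1).filter
            (fun j => decide ((pvCounts followers).getD (i, j) 0 = pvM followers))).map (fun j => [i, j])) _
        (fun acc i _ => PySem.List.foldl_append_ite _ _ _ acc)]
  rw [PySem.List.foldl_append_eq_flatMap]
  rw [pvPairList]
  rw [List.filter_flatMap]
  simp only [List.filter_map, List.map_flatMap, List.map_map]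
  rfl

lemma pv_max_ite (m v : Int) : (if v > m then v else m) = max m v := by
  rw [max_def]
  split_ifs <;> omega

lemma pv_M_eq (followers : List (List Int)) :
    pvMax (fun p => (pvCounts followers).getD p 0) (pvPairList (followers.length : Int)) = pvM followers := by
  unfold pvM
  rw [PySem.List.foldl_congr_mem _ _ (fun m v => max m v) _ (fun m v _ => pv_max_ite m v)]
  rw [PySem.Dict.values_eq_map_keys _ (pv_counts_keys_nodup followers) 0, pv_counts_keys]
  have hcnt : ∀ (P : List (Int × Int)),
      P.map (fun p => (pvCounts followers).getD p 0) =
        P.map (fun p => ((pvPairs followers).count p : Int)) :=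
    fun P => List.map_congr_left (fun p _ => pv_counts_getD followers p)
  rw [hcnt]
  set cnt : Int × Int → Int := fun p => ((pvPairs followers).count p : Int) with hcntdef
  have hL : pvMax (fun p => (pvCounts followers).getD p 0) (pvPairList (followers.length : Int)) =
      pvMax cnt (pvPairList (followers.length : Int)) := by
    unfold pvMax
    refine PySem.List.foldl_congr_mem _ _ _ _ (fun m p _ => ?_)
    show max m ((pvCounts followers).getD p 0) = max m (cnt p)
    rw [pv_counts_getD, hcntdef]
  rw [hL]
  -- both sides are running maxima over (different) lists; show antisymmetry
  apply le_antisymm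
  · -- pvMax cnt pairList ≤ fold over distinct pairs
    have : pvMax cnt (pvPairList (followers.length : Int)) =
        ((pvPairList (followers.length : Int)).map cnt).foldl max 0 := by
      unfold pvMax; rw [List.foldl_map]
    rw [this]
    rcases PySem.List.foldl_max_mem ((pvPairList (followers.length : Int)).map cnt) 0 with h | h
    · rw [h]
      exact (PySem.List.le_foldl_max ((PySem.Set.ofList (pvPairs followers)).map cnt) 0).1
    · obtain ⟨p, hp, hpe⟩ := List.mem_map.mp h
      rw [← hpe]
      by_cases hz : (pvPairs followers).count p = 0
      · have : cnt p = 0 := by simp [hcntdef, hz]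
        rw [this]
        exact (PySem.List.le_foldl_max ((PySem.Set.ofList (pvPairs followers)).map cnt) 0).1
      · have hpin : p ∈ pvPairs followers := by
          rcases List.count_pos_iff.mp (Nat.pos_of_ne_zero hz) with h; exact h
        exact (PySem.List.le_foldl_max ((PySem.Set.ofList (pvPairs followers)).map cnt) 0).2 _
          (List.mem_map_of_mem (show p ∈ PySem.Set.ofList (pvPairs followers) by
            simp [PySem.Set.mem_ofList, hpin]))
  · rcases PySem.List.foldl_max_mem ((PySem.Set.ofList (pvPairs followers)).map cnt) 0 with h | h
    · rw [h]
      exact (PySem.List.le_foldl_max_int (pvPairList (followers.length : Int)) cnt 0).1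
    · obtain ⟨p, hp, hpe⟩ := List.mem_map.mp h
      rw [← hpe]
      exact (PySem.List.le_foldl_max_int (pvPairList (followers.length : Int)) cnt 0).2 _
        (pv_mem_pairs_pairList followers p (by simpa [PySem.Set.mem_ofList] using hp))

lemma pv_main (followers : List (List Int)) :
    find_pairs_with_max_common_followers followers = find_pairs_with_max_common_followers_alt followers := by
  rw [pv_A_eq, pv_B_eq]
  have hCC : ∀ p ∈ pvPairList (followers.length : Int),
      pvCA followers p = (pvCounts followers).getD p 0 := by
    intro p hp
    obtain ⟨h0, hab, hbn⟩ := pv_mem_pairList.mp hp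
    rw [pv_counts_getD]
    rcases p with ⟨a, b⟩
    rw [pv_count_eq_len_inter followers a b h0 hab hbn]
    rfl
  have hM : pvMax (pvCA followers) (pvPairList (followers.length : Int)) = pvM followers := by
    rw [← pv_M_eq]
    unfold pvMax
    exact PySem.List.foldl_congr_mem _ _ _ _ (fun m p hp => by rw [hCC p hp])
  congr 1
  apply List.filter_congr
  intro p hp
  rw [hCC p hp, hM]

-- ===== VERDICT (by name: the statement is the Claim_ definition above) =====
theorem find_pairs_with_max_common_followers_spec : Claim_equal_find_pairs_with_max_common_followers := by
  intro followers _
  unfold Spec_find_pairs_with_max_common_followers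
  exact pv_main followers
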